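-- pv_equiv track=rewrite | github.com/ArthurBoaro/my-daily-coding-challenge-fcc | April 26, 2026.py | explode_fizzbuzz
-- ===== SOURCE A (Python) =====
-- def explode_fizzbuzz(target_z_count):
--
--     fizzbuzz_str = "fizzbuzz"
--     steps = 0
--
--     while fizzbuzz_str.count("z") < target_z_count:
--         new_str = ""
--
--         for i in range(1, len(fizzbuzz_str) + 1):
--             if i % 3 == 0 and i % 5 == 0:
--                 new_str += "fizzbuzz"
--             elif i % 3 == 0:
--                 new_str += "fizz"
--             elif i % 5 == 0:
--                 new_str += "buzz"
--             else:
--                 new_str += fizzbuzz_str[i - 1]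
--
--         steps += 1
--         fizzbuzz_str = new_str
--
--     return steps
-- ===== SOURCE B (Python) =====
-- def explode_fizzbuzz(target_z_count):
--     # Track only the length and the 1-based positions of the 'z' characters;
--     # f(p) = closed-form length of the expanded prefix of the first p characters.
--     F = [0, 1, 2, 6, 7, 11, 15, 16, 17, 21, 25, 26, 30, 31, 32]
--
--     def f(p):
--         return 40 * (p // 15) + F[p % 15]
--
--     n = 8
--     zs = [3, 4, 7, 8]
--     steps = 0
--     while len(zs) < target_z_count:
--         new = [f(p) for p in zs if p % 3 and p % 5]
--         for i in range(3, n + 1, 3):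
--             b = f(i - 1)
--             new.extend((b + 3, b + 4) if i % 5 else (b + 3, b + 4, b + 7, b + 8))
--         for i in range(5, n + 1, 5):
--             if i % 3:
--                 b = f(i - 1)
--                 new.extend((b + 3, b + 4))
--         zs = new
--         n = f(n)
--         steps += 1
--     return steps
-- ===== Notes on version B (the rewrite author's own statement) =====
-- stated objective: alternative
-- what changed: B never builds the expanded strings: it keeps only the string length and the list of positions of the 'z' characters, advancing surviving positions with a closed-form prefix-length map and emitting the z-positions of the inserted fizz/buzz/fizzbuzz blocks directly from the positions where insertions happen.
import Mathlib
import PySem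

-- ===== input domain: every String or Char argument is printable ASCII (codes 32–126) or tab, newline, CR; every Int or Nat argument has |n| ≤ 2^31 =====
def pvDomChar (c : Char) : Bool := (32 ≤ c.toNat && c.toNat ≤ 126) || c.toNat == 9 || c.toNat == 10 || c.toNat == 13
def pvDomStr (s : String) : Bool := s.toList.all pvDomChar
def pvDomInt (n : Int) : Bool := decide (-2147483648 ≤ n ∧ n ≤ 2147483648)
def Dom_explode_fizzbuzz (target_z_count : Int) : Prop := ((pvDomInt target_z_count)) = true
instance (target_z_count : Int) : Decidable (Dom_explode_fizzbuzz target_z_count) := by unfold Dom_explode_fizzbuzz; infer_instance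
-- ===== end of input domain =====

-- B replaces A's string rebuilding by integer bookkeeping of the 'z' positions (alternative
-- algorithm, same asymptotic cost); return values are proved equal for every target.

-- ===== PORT A =====
-- one pass of A's inner for-loop: the chunk appended at position i (1-based)
def pvChunkA (s : List Char) (i : Int) : List Char :=
  if PySem.Int.mod i 3 = 0 ∧ PySem.Int.mod i 5 = 0 then "fizzbuzz".toList
  else if PySem.Int.mod i 3 = 0 then "fizz".toList
  else if PySem.Int.mod i 5 = 0 then "buzz".toList
  else ((PySem.List.pyGet? s (i - 1)).map (fun c => [c])).getD []
  -- fizzbuzz_str[i-1]: 1 ≤ i ≤ len(s) here, so pyGet? is always `some`; the `[]` default is unreachable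

def pvStepA (s : List Char) : List Char :=
  (PySem.List.pyRange 1 (PySem.Chars.len s + 1) 1).foldl (fun acc i => acc ++ pvChunkA s i) []

-- the while loop; fuel = target.toNat suffices because the z-count starts at 4 and grows every pass
def pvLoopA (t : Int) : Nat → List Char → Int → Int
  | 0, _, steps => steps
  | fuel + 1, s, steps =>
      if (PySem.Chars.count s ['z'] : Int) < t then pvLoopA t fuel (pvStepA s) (steps + 1)
      else steps

def explode_fizzbuzz (target_z_count : Int) : Int :=
  pvLoopA target_z_count target_z_count.toNat "fizzbuzz".toList 0

-- ===== PORT B =====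
-- f(p) = 40*(p//15) + F[p%15]
def pvF (p : Int) : Int :=
  40 * PySem.Int.floordiv p 15 +
    PySem.List.pyGetD [0, 1, 2, 6, 7, 11, 15, 16, 17, 21, 25, 26, 30, 31, 32] (PySem.Int.mod p 15) 0

-- body of B's while loop: the next list of z-positions
def pvNewB (n : Int) (zs : List Int) : List Int :=
  let kept := (zs.filter (fun p => decide (PySem.Int.mod p 3 ≠ 0 ∧ PySem.Int.mod p 5 ≠ 0))).map pvF
  let m1 := (PySem.List.pyRange 3 (n + 1) 3).foldl
    (fun acc i =>
      acc ++ (if PySem.Int.mod i 5 ≠ 0 then [pvF (i - 1) + 3, pvF (i - 1) + 4]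
              else [pvF (i - 1) + 3, pvF (i - 1) + 4, pvF (i - 1) + 7, pvF (i - 1) + 8])) kept
  (PySem.List.pyRange 5 (n + 1) 5).foldl
    (fun acc i =>
      if PySem.Int.mod i 3 ≠ 0 then acc ++ [pvF (i - 1) + 3, pvF (i - 1) + 4] else acc) m1

def pvLoopB (t : Int) : Nat → Int → List Int → Int → Int
  | 0, _, _, steps => steps
  | fuel + 1, n, zs, steps =>
      if (zs.length : Int) < t then pvLoopB t fuel (pvF n) (pvNewB n zs) (steps + 1)
      else steps

def explode_fizzbuzz_alt (target_z_count : Int) : Int :=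
  pvLoopB target_z_count target_z_count.toNat 8 [3, 4, 7, 8] 0

-- ===== PRECONDITION & SPEC =====
def Spec_explode_fizzbuzz (target_z_count : Int) (out : Int) : Prop := out = explode_fizzbuzz_alt target_z_count
instance (target_z_count : Int) (out : Int) : Decidable (Spec_explode_fizzbuzz target_z_count out) := by unfold Spec_explode_fizzbuzz; infer_instance

-- ===== CLAIM (what is proved, stated in full; the proofs are below) =====
def Claim_equal_explode_fizzbuzz : Prop := ∀ (target_z_count : Int), Dom_explode_fizzbuzz target_z_count → Spec_explode_fizzbuzz target_z_count (explode_fizzbuzz target_z_count)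

-- ===== LEMMAS AND PROOFS =====

-- 1-based positions of 'z' in a char list, first char at position k
def pvZpos : List Char → Int → List Int
  | [], _ => []
  | c :: cs, k => (if c = 'z' then [k] else []) ++ pvZpos cs (k + 1)

-- spec forms of B's two insertion folds, with an arbitrary upper bound
def pvIns3 (b : Int) : List Int :=
  (PySem.List.pyRange 3 b 3).flatMap
    (fun i => if PySem.Int.mod i 5 ≠ 0 then [pvF (i - 1) + 3, pvF (i - 1) + 4]
              else [pvF (i - 1) + 3, pvF (i - 1) + 4, pvF (i - 1) + 7, pvF (i - 1) + 8])

def pvIns5 (b : Int) : List Int :=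
  (PySem.List.pyRange 5 b 5).flatMap
    (fun i => if PySem.Int.mod i 3 ≠ 0 then [pvF (i - 1) + 3, pvF (i - 1) + 4] else [])

def pvGood (p : Int) : Bool := decide (PySem.Int.mod p 3 ≠ 0 ∧ PySem.Int.mod p 5 ≠ 0)

lemma pvZpos_append (a b : List Char) (k : Int) :
    pvZpos (a ++ b) k = pvZpos a k ++ pvZpos b (k + a.length) := by
  induction a generalizing k with
  | nil => simp [pvZpos]
  | cons c cs ih => simp [pvZpos, ih, add_comm, add_left_comm]

lemma pvZpos_length (s : List Char) (k : Int) :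
    (pvZpos s k).length = s.count 'z' := by
  induction s generalizing k with
  | nil => simp [pvZpos]
  | cons c cs ih =>
    by_cases hc : c = 'z'
    · subst hc; simp [pvZpos, ih]
    · simp [pvZpos, hc, ih]

lemma go_z (fuel : Nat) : ∀ (l : List Char) (acc : Nat), l.length ≤ fuel →
    PySem.Chars.count.go ['z'] fuel l acc = acc + l.count 'z' := by
  induction fuel with
  | zero =>
    intro l acc h
    have hl : l = [] := List.eq_nil_of_length_eq_zero (Nat.le_zero.mp h)
    subst hl; simp [PySem.Chars.count.go]
  | succ n ih =>
    intro l acc h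
    cases l with
    | nil => simp [PySem.Chars.count.go]
    | cons c t =>
      rw [PySem.Chars.count.go]
      by_cases hc : c = 'z'
      · subst hc
        simp only [List.isPrefixOf, BEq.rfl, Bool.and_eq_true]
        rw [if_pos (by simp)]
        rw [ih _ _ (by simpa using Nat.le_of_succ_le_succ h)]
        simp [List.count_cons]
        omega
      · have hpre : (['z'].isPrefixOf (c :: t)) = false := by
          simp [List.isPrefixOf]
          exact fun hz => (hc hz.symm).elim
        rw [hpre]
        simp only [Bool.false_eq_true, if_false]
        rw [ih _ _ (Nat.le_of_succ_le_succ (by simpa using h))]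
        simp [List.count_cons, hc]

lemma pvCount_z (s : List Char) : PySem.Chars.count s ['z'] = s.count 'z' := by
  simp [PySem.Chars.count]
  rw [go_z s.length s 0 le_rfl]
  simp

lemma pvF_succ (m : Int) :
    pvF (m + 1) = pvF m +
      (if (15 : Int) ∣ (m + 1) then 8 else if (3 : Int) ∣ (m + 1) then 4
       else if (5 : Int) ∣ (m + 1) then 4 else 1) := by
  unfold pvF
  rw [PySem.Int.floordiv_eq_ediv_of_pos (by norm_num), PySem.Int.floordiv_eq_ediv_of_pos (by norm_num),
      PySem.Int.mod_eq_emod_of_pos (by norm_num), PySem.Int.mod_eq_emod_of_pos (by norm_num)]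
  have h3 : ((3:Int) ∣ (m+1)) ↔ ((m+1) % 3 = 0) := by omega
  have h5 : ((5:Int) ∣ (m+1)) ↔ ((m+1) % 5 = 0) := by omega
  have h15 : ((15:Int) ∣ (m+1)) ↔ ((m+1) % 15 = 0) := by omega
  simp only [h3, h5, h15]
  have hr : m % 15 = 0 ∨ m % 15 = 1 ∨ m % 15 = 2 ∨ m % 15 = 3 ∨ m % 15 = 4 ∨ m % 15 = 5 ∨ m % 15 = 6 ∨ m % 15 = 7 ∨ m % 15 = 8 ∨ m % 15 = 9 ∨ m % 15 = 10 ∨ m % 15 = 11 ∨ m % 15 = 12 ∨ m % 15 = 13 ∨ m % 15 = 14 := by omega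
  rcases hr with hr|hr|hr|hr|hr|hr|hr|hr|hr|hr|hr|hr|hr|hr|hr <;>
  · have e15 : (m+1) % 15 = (m % 15 + 1) % 15 := by omega
    have e3 : (m+1) % 3 = (m % 15 + 1) % 3 := by omega
    have e5 : (m+1) % 5 = (m % 15 + 1) % 5 := by omega
    rw [e15, e3, e5, hr]
    norm_num [PySem.List.pyGetD, PySem.List.pyGet?, PySem.List.pyIdx?, Int.toNat, List.getElem_cons_succ]
    omega

lemma pvRange3_succ (b : Int) (h : 1 ≤ b) :
    PySem.List.pyRange 3 (b + 1) 3 =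
      PySem.List.pyRange 3 b 3 ++ (if (3 : Int) ∣ b then [b] else []) := by
  rw [PySem.List.pyRange_of_pos 3 (b+1) (by norm_num), PySem.List.pyRange_of_pos 3 b (by norm_num)]
  by_cases hd : (3 : Int) ∣ b
  · have hb3 : (3:Int) ≤ b := by omega
    have t1 : (3:Int) < b + 1 := by omega
    rw [if_pos hd, if_pos t1]
    by_cases t2 : (3:Int) < b
    · rw [if_pos t2]
      have hc : ((b + 1 - 3 + 3 - 1) / 3).toNat = ((b - 3 + 3 - 1) / 3).toNat + 1 := by omega
      rw [hc, List.range_succ]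
      simp only [List.map_append, List.map_cons, List.map_nil]
      congr 2
      omega
    · have hb : b = 3 := by omega
      subst hb
      norm_num
  · rw [if_neg hd]
    by_cases h3b : (3:Int) < b + 1
    · have t2 : (3:Int) < b := by omega
      rw [if_pos h3b, if_pos t2]
      have : ((b + 1 - 3 + 3 - 1) / 3).toNat = ((b - 3 + 3 - 1) / 3).toNat := by omega
      rw [this]; simp
    · rw [if_neg h3b, if_neg (by omega : ¬ (3:Int) < b)]; simp

lemma pvRange5_succ (b : Int) (h : 1 ≤ b) :
    PySem.List.pyRange 5 (b + 1) 5 =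
      PySem.List.pyRange 5 b 5 ++ (if (5 : Int) ∣ b then [b] else []) := by
  rw [PySem.List.pyRange_of_pos 5 (b+1) (by norm_num), PySem.List.pyRange_of_pos 5 b (by norm_num)]
  by_cases hd : (5 : Int) ∣ b
  · have hb5 : (5:Int) ≤ b := by omega
    have t1 : (5:Int) < b + 1 := by omega
    rw [if_pos hd, if_pos t1]
    by_cases t2 : (5:Int) < b
    · rw [if_pos t2]
      have hc : ((b + 1 - 5 + 5 - 1) / 5).toNat = ((b - 5 + 5 - 1) / 5).toNat + 1 := by omega
      rw [hc, List.range_succ]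
      simp only [List.map_append, List.map_cons, List.map_nil]
      congr 2
      omega
    · have hb : b = 5 := by omega
      subst hb
      norm_num
  · rw [if_neg hd]
    by_cases h5b : (5:Int) < b + 1
    · have t2 : (5:Int) < b := by omega
      rw [if_pos h5b, if_pos t2]
      have : ((b + 1 - 5 + 5 - 1) / 5).toNat = ((b - 5 + 5 - 1) / 5).toNat := by omega
      rw [this]; simp
    · rw [if_neg h5b, if_neg (by omega : ¬ (5:Int) < b)]; simp

lemma zpos_fizzbuzz (k : Int) : pvZpos "fizzbuzz".toList k = [k+2, k+3, k+6, k+7] := by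
  show pvZpos ['f','i','z','z','b','u','z','z'] k = _
  simp [pvZpos]
  ring_nf
  norm_num
lemma zpos_fizz (k : Int) : pvZpos "fizz".toList k = [k+2, k+3] := by
  show pvZpos ['f','i','z','z'] k = _
  simp [pvZpos]
  ring_nf
  norm_num
lemma zpos_buzz (k : Int) : pvZpos "buzz".toList k = [k+2, k+3] := by
  show pvZpos ['b','u','z','z'] k = _
  simp [pvZpos]
  ring_nf
  norm_num
lemma zpos_single (c : Char) (k : Int) : pvZpos [c] k = if c = 'z' then [k] else [] := by
  simp [pvZpos]

lemma pvNewB_eq (n : Int) (zs : List Int) :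
    pvNewB n zs = (zs.filter pvGood).map pvF ++ pvIns3 (n + 1) ++ pvIns5 (n + 1) := by
  unfold pvNewB pvIns3 pvIns5 pvGood
  dsimp only
  rw [PySem.List.foldl_append_eq_flatMap]
  rw [PySem.List.foldl_congr_mem _ _
    (fun acc i => acc ++ (if PySem.Int.mod i 3 ≠ 0 then [pvF (i - 1) + 3, pvF (i - 1) + 4] else [])) _
    (by intro acc x _; by_cases hx : (3:Int) ∣ x <;> simp [hx, PySem.Int.mod_eq_zero_iff_dvd])]
  rw [PySem.List.foldl_append_eq_flatMap]

lemma pvStepA_eq (s : List Char) :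
    pvStepA s = (List.range s.length).flatMap (fun (k : Nat) => pvChunkA s (1 + (k : Int))) := by
  unfold pvStepA
  rw [PySem.List.foldl_append_eq_flatMap]
  rw [PySem.List.pyRange_one]
  have h : (PySem.Chars.len s + 1 - 1).toNat = s.length := by simp [PySem.Chars.len]
  rw [h, List.flatMap_map]
  simp

lemma pvIns3_succ (b : Int) (h : 1 ≤ b) :
    pvIns3 (b + 1) = pvIns3 b ++
      (if (3 : Int) ∣ b then
        (if PySem.Int.mod b 5 ≠ 0 then [pvF (b-1) + 3, pvF (b-1) + 4]
         else [pvF (b-1) + 3, pvF (b-1) + 4, pvF (b-1) + 7, pvF (b-1) + 8]) else []) := by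
  unfold pvIns3
  rw [pvRange3_succ b h, List.flatMap_append]
  by_cases hd : (3:Int) ∣ b <;> simp [hd]

lemma pvIns5_succ (b : Int) (h : 1 ≤ b) :
    pvIns5 (b + 1) = pvIns5 b ++
      (if (5 : Int) ∣ b then
        (if PySem.Int.mod b 3 ≠ 0 then [pvF (b-1) + 3, pvF (b-1) + 4] else []) else []) := by
  unfold pvIns5
  rw [pvRange5_succ b h, List.flatMap_append]
  by_cases hd : (5:Int) ∣ b <;> simp [hd]

lemma zpos_fizzbuzz' (c : Int) : pvZpos "fizzbuzz".toList (c + 1) = [c+3, c+4, c+7, c+8] := by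
  rw [zpos_fizzbuzz]; simp only [List.cons.injEq, and_true]; omega
lemma zpos_fizz' (c : Int) : pvZpos "fizz".toList (c + 1) = [c+3, c+4] := by
  rw [zpos_fizz]; simp only [List.cons.injEq, and_true]; omega
lemma zpos_buzz' (c : Int) : pvZpos "buzz".toList (c + 1) = [c+3, c+4] := by
  rw [zpos_buzz]; simp only [List.cons.injEq, and_true]; omega

lemma pvPrefix (s : List Char) (m : Nat) (hm : m ≤ s.length) :
    (((List.range m).flatMap (fun (k : Nat) => pvChunkA s (1 + (k : Int)))).length : Int) = pvF m ∧
    (↑(pvZpos ((List.range m).flatMap (fun (k : Nat) => pvChunkA s (1 + (k : Int)))) 1) : Multiset Int) =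
      ↑(((pvZpos (s.take m) 1).filter pvGood).map pvF) + ↑(pvIns3 ((m : Int) + 1)) + ↑(pvIns5 ((m : Int) + 1)) := by
  induction m with
  | zero =>
    constructor
    · norm_num
      decide
    · norm_num [pvZpos]
      rw [show pvIns3 1 = [] by decide, show pvIns5 1 = [] by decide]
      simp [pvZpos]
  | succ m ih =>
    obtain ⟨ih1, ih2⟩ := ih (Nat.le_of_succ_le hm)
    have hmlt : m < s.length := hm
    have hflat : (List.range (m+1)).flatMap (fun (k : Nat) => pvChunkA s (1 + (k : Int))) =
        (List.range m).flatMap (fun (k : Nat) => pvChunkA s (1 + (k : Int))) ++ pvChunkA s ((m : Int) + 1) := by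
      rw [List.range_succ, List.flatMap_append]
      simp [add_comm]
    have hcast : ((m+1 : Nat) : Int) = (m : Int) + 1 := by push_cast; ring
    have hb1 : (1 : Int) ≤ (m : Int) + 1 := by omega
    have hsub : ((m : Int) + 1) - 1 = (m : Int) := by ring
    have htake : s.take (m+1) = s.take m ++ [s[m]] := by
      rw [List.take_succ, List.getElem?_eq_getElem hmlt]
      simp
    have hlentake : (s.take m).length = m := by
      rw [List.length_take]; omega
    have hoff : (1 : Int) + ((s.take m).length : Int) = (m : Int) + 1 := by
      rw [hlentake]; ring
    have hoffP : (1 : Int) + (((List.range m).flatMap (fun (k : Nat) => pvChunkA s (1 + (k : Int)))).length : Int)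
        = pvF (m : Int) + 1 := by
      rw [ih1]; ring
    rw [hcast, hflat, htake]
    by_cases h3 : (3 : Int) ∣ ((m : Int) + 1) <;> by_cases h5 : (5 : Int) ∣ ((m : Int) + 1)
    · -- fizzbuzz
      have h15 : (15 : Int) ∣ ((m : Int) + 1) := by omega
      have hc : pvChunkA s ((m : Int) + 1) = "fizzbuzz".toList := by
        unfold pvChunkA
        rw [if_pos ⟨(PySem.Int.mod_eq_zero_iff_dvd _ _).mpr h3, (PySem.Int.mod_eq_zero_iff_dvd _ _).mpr h5⟩]
      have hF : pvF ((m : Int) + 1) = pvF (m : Int) + 8 := by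
        rw [pvF_succ, if_pos h15]
      have hgood : pvGood ((m : Int) + 1) = false := by
        simp [pvGood, PySem.Int.mod_eq_zero_iff_dvd, h3]
      have hins3 : pvIns3 ((m : Int) + 1 + 1) = pvIns3 ((m : Int) + 1) ++
          [pvF (m : Int) + 3, pvF (m : Int) + 4, pvF (m : Int) + 7, pvF (m : Int) + 8] := by
        rw [pvIns3_succ _ hb1, if_pos h3, if_neg (by simp [PySem.Int.mod_eq_zero_iff_dvd, h5]), hsub]
      have hins5 : pvIns5 ((m : Int) + 1 + 1) = pvIns5 ((m : Int) + 1) := by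
        rw [pvIns5_succ _ hb1, if_pos h5,
            if_neg (show ¬ (PySem.Int.mod ((m:Int)+1) 3 ≠ 0) by simp [PySem.Int.mod_eq_zero_iff_dvd, h3])]
        simp
      constructor
      · rw [List.length_append, hc, hF]
        push_cast
        rw [ih1]
        norm_num
      · rw [pvZpos_append, hc, hoffP, zpos_fizzbuzz']
        rw [pvZpos_append, hoff, zpos_single]
        rw [List.filter_append, List.map_append, hins3, hins5]
        have hfz : (List.filter pvGood (if s[m] = 'z' then [(m : Int) + 1] else [])).map pvF = [] := by
          by_cases hz : s[m] = 'z' <;> simp [hz, hgood]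
        rw [hfz, List.append_nil]
        simp only [← Multiset.coe_add]
        rw [ih2]
        abel
    · -- fizz
      have h15 : ¬ (15 : Int) ∣ ((m : Int) + 1) := by omega
      have hc : pvChunkA s ((m : Int) + 1) = "fizz".toList := by
        unfold pvChunkA
        rw [if_neg (by simp [PySem.Int.mod_eq_zero_iff_dvd, h5]),
            if_pos ((PySem.Int.mod_eq_zero_iff_dvd _ _).mpr h3)]
      have hF : pvF ((m : Int) + 1) = pvF (m : Int) + 4 := by
        rw [pvF_succ, if_neg h15, if_pos h3]
      have hgood : pvGood ((m : Int) + 1) = false := by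
        simp [pvGood, PySem.Int.mod_eq_zero_iff_dvd, h3]
      have hins3 : pvIns3 ((m : Int) + 1 + 1) = pvIns3 ((m : Int) + 1) ++
          [pvF (m : Int) + 3, pvF (m : Int) + 4] := by
        rw [pvIns3_succ _ hb1, if_pos h3, if_pos (by simp [PySem.Int.mod_eq_zero_iff_dvd, h5]), hsub]
      have hins5 : pvIns5 ((m : Int) + 1 + 1) = pvIns5 ((m : Int) + 1) := by
        rw [pvIns5_succ _ hb1, if_neg h5]
        simp
      constructor
      · rw [List.length_append, hc, hF]
        push_cast
        rw [ih1]
        norm_num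
      · rw [pvZpos_append, hc, hoffP, zpos_fizz']
        rw [pvZpos_append, hoff, zpos_single]
        rw [List.filter_append, List.map_append, hins3, hins5]
        have hfz : (List.filter pvGood (if s[m] = 'z' then [(m : Int) + 1] else [])).map pvF = [] := by
          by_cases hz : s[m] = 'z' <;> simp [hz, hgood]
        rw [hfz, List.append_nil]
        simp only [← Multiset.coe_add]
        rw [ih2]
        abel
    · -- buzz
      have h15 : ¬ (15 : Int) ∣ ((m : Int) + 1) := by omega
      have hc : pvChunkA s ((m : Int) + 1) = "buzz".toList := by
        unfold pvChunkA
        rw [if_neg (by simp [PySem.Int.mod_eq_zero_iff_dvd, h3]),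
            if_neg (by simp [PySem.Int.mod_eq_zero_iff_dvd, h3]),
            if_pos ((PySem.Int.mod_eq_zero_iff_dvd _ _).mpr h5)]
      have hF : pvF ((m : Int) + 1) = pvF (m : Int) + 4 := by
        rw [pvF_succ, if_neg h15, if_neg (by simpa using h3), if_pos h5]
      have hgood : pvGood ((m : Int) + 1) = false := by
        simp [pvGood, PySem.Int.mod_eq_zero_iff_dvd, h5]
      have hins3 : pvIns3 ((m : Int) + 1 + 1) = pvIns3 ((m : Int) + 1) := by
        rw [pvIns3_succ _ hb1, if_neg h3]
        simp
      have hins5 : pvIns5 ((m : Int) + 1 + 1) = pvIns5 ((m : Int) + 1) ++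
          [pvF (m : Int) + 3, pvF (m : Int) + 4] := by
        rw [pvIns5_succ _ hb1, if_pos h5, if_pos (by simp [PySem.Int.mod_eq_zero_iff_dvd, h3]), hsub]
      constructor
      · rw [List.length_append, hc, hF]
        push_cast
        rw [ih1]
        norm_num
      · rw [pvZpos_append, hc, hoffP, zpos_buzz']
        rw [pvZpos_append, hoff, zpos_single]
        rw [List.filter_append, List.map_append, hins3, hins5]
        have hfz : (List.filter pvGood (if s[m] = 'z' then [(m : Int) + 1] else [])).map pvF = [] := by
          by_cases hz : s[m] = 'z' <;> simp [hz, hgood]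
        rw [hfz, List.append_nil]
        simp only [← Multiset.coe_add]
        rw [ih2]
        abel
    · -- kept character
      have h15 : ¬ (15 : Int) ∣ ((m : Int) + 1) := by omega
      have hc : pvChunkA s ((m : Int) + 1) = [s[m]] := by
        unfold pvChunkA
        rw [if_neg (by simp [PySem.Int.mod_eq_zero_iff_dvd, h3]),
            if_neg (by simp [PySem.Int.mod_eq_zero_iff_dvd, h3]),
            if_neg (by simp [PySem.Int.mod_eq_zero_iff_dvd, h5]),
            hsub]
        rw [show ((m : Int)) = ((m : Nat) : Int) by norm_num, PySem.List.pyGet?_natCast,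
            List.getElem?_eq_getElem hmlt]
        rfl
      have hF : pvF ((m : Int) + 1) = pvF (m : Int) + 1 := by
        rw [pvF_succ, if_neg h15, if_neg (by simpa using h3), if_neg (by simpa using h5)]
      have hgood : pvGood ((m : Int) + 1) = true := by
        simp [pvGood, PySem.Int.mod_eq_zero_iff_dvd, h3, h5]
      have hins3 : pvIns3 ((m : Int) + 1 + 1) = pvIns3 ((m : Int) + 1) := by
        rw [pvIns3_succ _ hb1, if_neg h3]
        simp
      have hins5 : pvIns5 ((m : Int) + 1 + 1) = pvIns5 ((m : Int) + 1) := by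
        rw [pvIns5_succ _ hb1, if_neg h5]
        simp
      constructor
      · rw [List.length_append, hc, hF]
        push_cast
        rw [ih1]
        norm_num
      · rw [pvZpos_append, hc, hoffP, zpos_single]
        rw [pvZpos_append, hoff, zpos_single]
        rw [List.filter_append, List.map_append, hins3, hins5]
        have hfz : (List.filter pvGood (if s[m] = 'z' then [(m : Int) + 1] else [])).map pvF =
            (if s[m] = 'z' then [pvF (m : Int) + 1] else []) := by
          by_cases hz : s[m] = 'z' <;> simp [hz, hgood, hF]
        rw [hfz]
        by_cases hz : s[m] = 'z'
        · rw [if_pos hz]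
          simp only [← Multiset.coe_add]
          rw [ih2]
          abel
        · rw [if_neg hz]
          simp only [← Multiset.coe_add, List.append_nil]
          rw [ih2]

lemma pvStep_spec (s : List Char) :
    ((pvStepA s).length : Int) = pvF (s.length : Int) ∧
    (↑(pvZpos (pvStepA s) 1) : Multiset Int) =
      ↑(((pvZpos s 1).filter pvGood).map pvF) + ↑(pvIns3 ((s.length : Int) + 1)) + ↑(pvIns5 ((s.length : Int) + 1)) := by
  have h := pvPrefix s s.length le_rfl
  rw [List.take_length] at h
  rw [pvStepA_eq]
  exact h

lemma pvLoop_eq (t : Int) (fuel : Nat) :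
    ∀ (s : List Char) (n : Int) (zs : List Int) (steps : Int),
      n = (s.length : Int) → zs.Perm (pvZpos s 1) →
      pvLoopA t fuel s steps = pvLoopB t fuel n zs steps := by
  induction fuel with
  | zero => intro s n zs steps _ _; rfl
  | succ fuel ih =>
    intro s n zs steps hn hperm
    have hcount : (PySem.Chars.count s ['z'] : Int) = (zs.length : Int) := by
      rw [pvCount_z, hperm.length_eq, pvZpos_length]
    rw [pvLoopA, pvLoopB, hcount]
    by_cases hlt : ((zs.length : Int) < t)
    · rw [if_pos hlt, if_pos hlt]
      apply ih
      · rw [hn, (pvStep_spec s).1]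
      · -- pvNewB n zs is a permutation of the new z-position list
        apply Multiset.coe_eq_coe.mp
        rw [pvNewB_eq, (pvStep_spec s).2]
        subst hn
        simp only [← Multiset.coe_add]
        congr 2
        exact Multiset.coe_eq_coe.mpr ((hperm.filter _).map _)
    · rw [if_neg hlt, if_neg hlt]

-- ===== VERDICT (by name: the statement is the Claim_ definition above) =====
theorem explode_fizzbuzz_spec : Claim_equal_explode_fizzbuzz := by
  intro t _
  show explode_fizzbuzz t = explode_fizzbuzz_alt t
  unfold explode_fizzbuzz explode_fizzbuzz_alt
  exact pvLoop_eq t t.toNat _ 8 _ 0 (by decide) (by decide)
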